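-- pv_equiv track=rewrite | github.com/SolomonB14D3/knowledge-fidelity | src/rho_eval/snap_on/training.py | _format_sharegpt
-- ===== SOURCE A (Python) =====
-- def _format_sharegpt(example: dict) -> tuple:
--     """Format ShareGPT-style example -> (instruction, response)."""
--     convos = example.get("conversations", [])
--     if len(convos) < 2:
--         return None, None
--     # Find first human + assistant pair
--     instruction = None
--     response = None
--     for msg in convos:
--         role = msg.get("from", msg.get("role", ""))
--         content = msg.get("value", msg.get("content", ""))
--         if role in ("human", "user") and instruction is None:
--             instruction = content
--         elif role in ("gpt", "assistant") and instruction is not None: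
--             response = content
--             break
--     return instruction, response
-- ===== SOURCE B (Python) =====
-- def _format_sharegpt(example: dict) -> tuple:
--     """Format ShareGPT-style example -> (instruction, response).
--
--     Two sequential scans instead of one stateful loop: first locate the
--     first human/user message, then search only the tail after it for the
--     first gpt/assistant message.
--     """
--     convos = example.get("conversations", [])
--     if len(convos) < 2:
--         return None, None
--     idx = None
--     instruction = None
--     for i, msg in enumerate(convos):
--         if msg.get("from", msg.get("role", "")) in ("human", "user"):
--             idx = i
--             instruction = msg.get("value", msg.get("content", ""))
--             break
--     if idx is None:
--         return None, None
--     for msg in convos[idx + 1:]: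
--         if msg.get("from", msg.get("role", "")) in ("gpt", "assistant"):
--             return instruction, msg.get("value", msg.get("content", ""))
--     return instruction, None
-- ===== Notes on version B (the rewrite author's own statement) =====
-- stated objective: alternative
-- what changed: Replaces A's single stateful loop (instruction/response accumulators with an elif guard) by two sequential scans: find the first human/user message, then search only the tail after it for the first gpt/assistant message.
import Mathlib
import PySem

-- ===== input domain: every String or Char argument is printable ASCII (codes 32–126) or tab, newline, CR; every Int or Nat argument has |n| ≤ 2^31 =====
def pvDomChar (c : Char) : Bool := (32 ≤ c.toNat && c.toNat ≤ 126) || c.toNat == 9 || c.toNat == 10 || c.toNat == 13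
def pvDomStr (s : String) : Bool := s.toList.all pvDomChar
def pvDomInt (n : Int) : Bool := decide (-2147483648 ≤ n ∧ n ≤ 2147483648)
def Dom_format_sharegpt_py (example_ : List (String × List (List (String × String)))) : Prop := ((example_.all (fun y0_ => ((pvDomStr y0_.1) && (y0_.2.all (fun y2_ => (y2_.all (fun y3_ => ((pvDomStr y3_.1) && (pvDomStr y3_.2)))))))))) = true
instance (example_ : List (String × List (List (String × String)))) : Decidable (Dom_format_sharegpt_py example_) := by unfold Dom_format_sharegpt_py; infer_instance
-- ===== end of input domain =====

-- B replaces A's single stateful loop by two sequential scans (find first human message, then first assistant after it); same cost, different decomposition.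


-- ===== PORT A =====
-- msg.get("from", msg.get("role","")) ; dict → assoc list, lookup = first match
def pvRole (msg : List (String × String)) : String :=
  ((msg.lookup "from").getD ((msg.lookup "role").getD ""))
def pvContent (msg : List (String × String)) : String :=
  ((msg.lookup "value").getD ((msg.lookup "content").getD ""))

-- A's for-loop over convos with accumulators instruction/response; 'break' = returning directly
def pvLoopA : List (List (String × String)) → Option String → Option String → Option String × Option String
  | [], instr, resp => (instr, resp)
  | msg :: rest, instr, resp =>
    let role := pvRole msg
    let content := pvContent msg
    if (role = "human" ∨ role = "user") ∧ instr = none then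
      pvLoopA rest (some content) resp
    else if (role = "gpt" ∨ role = "assistant") ∧ instr ≠ none then
      (instr, some content)
    else
      pvLoopA rest instr resp

def format_sharegpt_py (example_ : List (String × List (List (String × String)))) : Option String × Option String :=
  let convos := (example_.lookup "conversations").getD []
  if convos.length < 2 then (none, none)
  else pvLoopA convos none none

-- ===== PORT B =====
-- first pass: first human/user message → its content and the tail after it
def pvFindHuman : List (List (String × String)) → Option (String × List (List (String × String)))
  | [] => none
  | msg :: rest =>
    if pvRole msg = "human" ∨ pvRole msg = "user" then some (pvContent msg, rest)
    else pvFindHuman rest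

-- second pass: first gpt/assistant content in the tail
def pvFindAsst : List (List (String × String)) → Option String
  | [] => none
  | msg :: rest =>
    if pvRole msg = "gpt" ∨ pvRole msg = "assistant" then some (pvContent msg)
    else pvFindAsst rest

def format_sharegpt_py_alt (example_ : List (String × List (List (String × String)))) : Option String × Option String :=
  let convos := (example_.lookup "conversations").getD []
  if convos.length < 2 then (none, none)
  else
    match pvFindHuman convos with
    | none => (none, none)
    | some (instr, tail) => (some instr, pvFindAsst tail)

-- ===== PRECONDITION & SPEC =====
def Spec_format_sharegpt_py (example_ : List (String × List (List (String × String)))) (out : Option String × Option String) : Prop := out = format_sharegpt_py_alt example_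
instance (example_ : List (String × List (List (String × String)))) (out : Option String × Option String) : Decidable (Spec_format_sharegpt_py example_ out) := by unfold Spec_format_sharegpt_py; infer_instance

-- ===== CLAIM (what is proved, stated in full; the proofs are below) =====
def Claim_equal_format_sharegpt_py : Prop := ∀ (example_ : List (String × List (List (String × String)))), Dom_format_sharegpt_py example_ → Spec_format_sharegpt_py example_ (format_sharegpt_py example_)

-- ===== LEMMAS AND PROOFS =====
-- once instruction is set, A's loop is exactly the assistant search
lemma pvLoopA_some (l : List (List (String × String))) (c : String) :
    pvLoopA l (some c) none = (some c, pvFindAsst l) := by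
  induction l with
  | nil => simp [pvLoopA, pvFindAsst]
  | cons msg rest ih =>
    simp only [pvLoopA, pvFindAsst]
    split_ifs with h1 h2 h2 <;> simp_all

-- from the initial state, A's loop is find-human then find-assistant
lemma pvLoopA_none (l : List (List (String × String))) :
    pvLoopA l none none =
      match pvFindHuman l with
      | none => (none, none)
      | some (instr, tail) => (some instr, pvFindAsst tail) := by
  induction l with
  | nil => simp [pvLoopA, pvFindHuman]
  | cons msg rest ih =>
    simp only [pvLoopA, pvFindHuman]
    split_ifs with h1 h2 <;> simp_all [pvLoopA_some]

-- ===== VERDICT (by name: the statement is the Claim_ definition above) =====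
theorem format_sharegpt_py_spec : Claim_equal_format_sharegpt_py := by
  intro example_ _
  unfold Spec_format_sharegpt_py format_sharegpt_py format_sharegpt_py_alt
  simp only []
  split_ifs with h
  · rfl
  · exact pvLoopA_none _
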